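-- pv_equiv track=rewrite | github.com/jeemyeong/problem-solving | boj/2800/Main.py | solve
-- ===== SOURCE A (Python) =====
-- def solve(string):
--     stack = []
--     for i, e in enumerate(string):
--         if e == "(":
--             stack.append(i)
--         elif e == ")" and len(stack) > 1:
--             j = stack.pop()
--         elif e == ")" and len(stack) == 1:
--             j = stack.pop()
--             front = string[:j]
--             middles = solve(string[j+1:i])
--             backs = solve(string[i+1:])
--             ret = set()
--             for middle in middles:
--                 for back in backs:
--                     ret.add(front+"("+middle+")"+back)
--                     ret.add(front+middle+back)
--             return ret
--     return set([string])
-- ===== SOURCE B (Python) =====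
-- def solve(string):
--     # Parse once into a table of removable bracket pairs, then enumerate every
--     # subset of the table with a bitmask and build each resulting string directly.
--     # (A pair nested inside an unmatched "(" can never be removed, so it is never
--     # recorded: match() only reports a "(" whose group closes.)
--
--     def match(s):
--         # (j, i) for the first "(" whose bracket group is completed in s, else None
--         depth = 0
--         j = -1
--         for i, ch in enumerate(s):
--             if ch == "(":
--                 if depth == 0:
--                     j = i
--                 depth += 1
--             elif ch == ")" and depth > 0:
--                 depth -= 1
--                 if depth == 0:
--                     return (j, i)
--         return None
--
--     def pairs(s, off):
--         # table of removable pairs as absolute positions, most significant first: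
--         # pairs inside a group, then pairs after it, then the group's own pair
--         m = match(s)
--         if m is None:
--             return []
--         j, i = m
--         return (pairs(s[j + 1:i], off + j + 1)
--                 + pairs(s[i + 1:], off + i + 1)
--                 + [(off + j, off + i)])
--
--     sig = pairs(string, 0)
--     k = len(sig)
--     out = set()
--     for mask in range(1 << k):
--         skip = set()
--         for b, (o, c) in enumerate(sig):
--             if (mask >> (k - 1 - b)) & 1:
--                 skip.add(o)
--                 skip.add(c)
--         out.add("".join(ch for t, ch in enumerate(string) if t not in skip))
--     return out
-- ===== Notes on version B (the rewrite author's own statement) =====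
-- stated objective: alternative
-- what changed: A enumerates by recursively splitting at the first closed group and taking a set product of the recursive results; B parses the string once into a flat table of removable bracket pairs and then iterates over all 2^k bitmasks, building each candidate string directly from the mask.
import Mathlib
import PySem

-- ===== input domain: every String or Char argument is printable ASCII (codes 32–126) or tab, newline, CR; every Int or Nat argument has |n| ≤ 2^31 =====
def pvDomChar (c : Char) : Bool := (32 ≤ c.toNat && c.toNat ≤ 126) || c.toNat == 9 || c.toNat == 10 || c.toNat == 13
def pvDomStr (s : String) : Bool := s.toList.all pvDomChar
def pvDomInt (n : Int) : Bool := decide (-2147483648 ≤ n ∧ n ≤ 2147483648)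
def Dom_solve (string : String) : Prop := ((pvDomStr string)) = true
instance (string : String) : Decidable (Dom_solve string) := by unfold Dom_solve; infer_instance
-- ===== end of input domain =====

-- B replaces A's recursive split-and-set-product enumeration by a one-time parse into a
-- table of removable bracket pairs followed by an iteration over all bitmask subsets
-- (objective: alternative algorithm of similar cost).


-- ===== PORT A =====
-- A's `for i, e in enumerate(string)` loop carrying the index stack (Python appends and
-- pops at the END of `stack`; here the HEAD of the list is that end). It returns the
-- (j, i) of the branch that returns, or none when the loop falls through.
def loopA : List Char → Nat → List Nat → Option (Nat × Nat)
  | [], _, _ => none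
  | e :: rest, i, stack =>
    if e = '(' then loopA rest (i + 1) (i :: stack)
    else if e = ')' ∧ 1 < stack.length then loopA rest (i + 1) stack.tail
    else if e = ')' ∧ stack.length = 1 then some (stack.headD 0, i)
    else loopA rest (i + 1) stack

-- bounds of the returned indices; needed only for solveA's termination
theorem loopA_bounds (cs : List Char) : ∀ (i0 : Nat) (st : List Nat),
    (∀ x ∈ st, x < i0) → ∀ j i, loopA cs i0 st = some (j, i) →
      j < i ∧ i0 ≤ i ∧ i < i0 + cs.length := by
  induction cs with
  | nil => intro i0 st h j i hji; simp [loopA] at hji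
  | cons e rest ih =>
    intro i0 st h j i hji
    simp only [loopA] at hji
    split_ifs at hji with h1 h2 h3
    · have := ih (i0 + 1) (i0 :: st) (by
        intro x hx; rcases List.mem_cons.1 hx with rfl | hx; omega
        exact Nat.lt_succ_of_lt (h x hx)) j i hji
      simpa [Nat.add_assoc, Nat.add_comm 1 rest.length] using by omega
    · have := ih (i0 + 1) st.tail (by
        intro x hx; exact Nat.lt_succ_of_lt (h x (List.mem_of_mem_tail hx))) j i hji
      simp only [List.length_cons]; omega
    · obtain ⟨hstr, hlen⟩ := h3
      obtain ⟨x, hx⟩ : ∃ x, st = [x] := List.length_eq_one_iff.1 hlen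
      subst hx
      simp only [List.headD, Option.some.injEq, Prod.mk.injEq] at hji
      have := h x (by simp)
      simp only [List.length_cons]; omega
    · have := ih (i0 + 1) st (fun x hx => Nat.lt_succ_of_lt (h x hx)) j i hji
      simp only [List.length_cons]; omega

-- the recursion of A; Python slices string[:j], string[j+1:i], string[i+1:] are
-- take/drop (PySem.List.slice_to_natCast / slice_natCast / slice_from_natCast for
-- in-range natural bounds); `ret` is a Python set built with PySem.Set.add.
def solveA (s : List Char) : List (List Char) :=
  match h : loopA s 0 [] with
  | none => [s]
  | some (j, i) =>
    let front := s.take j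
    let middles := solveA ((s.drop (j + 1)).take (i - (j + 1)))
    let backs := solveA (s.drop (i + 1))
    middles.foldl (fun ret m =>
      backs.foldl (fun ret b =>
        PySem.Set.add (PySem.Set.add ret (front ++ '(' :: (m ++ ')' :: b)))
          (front ++ (m ++ b))) ret) []
termination_by s.length
decreasing_by
  · have := loopA_bounds s 0 [] (by simp) j i h
    simp only [List.length_take, List.length_drop]; omega
  · have := loopA_bounds s 0 [] (by simp) j i h
    simp only [List.length_drop]; omega

def solve (string : String) : List String := (solveA string.toList).map String.ofList

-- ===== PORT B =====
-- B's match(): depth counter scan; j is the last "(" seen at depth 0 (Python keeps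
-- j = -1 until one is seen; that initial value is dead — it is returned only after
-- being assigned — so it is carried here as a Nat with placeholder 0).
def matchB : List Char → Nat → Nat → Nat → Option (Nat × Nat)
  | [], _, _, _ => none
  | ch :: rest, i, depth, j =>
    if ch = '(' then matchB rest (i + 1) (depth + 1) (if depth = 0 then i else j)
    else if ch = ')' ∧ 0 < depth then
      if depth = 1 then some (j, i) else matchB rest (i + 1) (depth - 1) j
    else matchB rest (i + 1) depth j

-- positions/characters of the returned indices; needed for pairsB's termination
theorem matchB_char (cs : List Char) : ∀ (i0 depth j0 : Nat),
    (0 < depth → j0 < i0) → ∀ j i, matchB cs i0 depth j0 = some (j, i) →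
      i0 ≤ i ∧ i - i0 < cs.length ∧ cs[i - i0]? = some ')' ∧ j < i ∧
      (i0 ≤ j → cs[j - i0]? = some '(') ∧ (j < i0 → 0 < depth ∧ j = j0) := by
  induction cs with
  | nil => intro i0 d j0 hj j i hji; simp [matchB] at hji
  | cons ch rest ih =>
    intro i0 d j0 hj j i hji
    simp only [matchB] at hji
    by_cases h1 : ch = '('
    · rw [if_pos h1] at hji
      subst h1
      have hj' : 0 < d + 1 → (if d = 0 then i0 else j0) < i0 + 1 := by
        intro _; split_ifs with hd
        · omega
        · exact Nat.lt_succ_of_lt (hj (Nat.pos_of_ne_zero hd))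
      obtain ⟨hi1, hi2, hi3, hji', hjc, hjlt⟩ := ih (i0 + 1) (d + 1) _ hj' j i hji
      refine ⟨by omega, by simp only [List.length_cons]; omega, ?_, hji', ?_, ?_⟩
      · have he : i - i0 = (i - (i0 + 1)) + 1 := by omega
        rw [he]; simpa using hi3
      · intro hij
        rcases Nat.lt_or_ge j (i0 + 1) with hlt | hge
        · obtain ⟨_, hj0⟩ := hjlt hlt
          by_cases hd : d = 0
          · rw [if_pos hd] at hj0
            subst hj0; simp
          · rw [if_neg hd] at hj0
            have := hj (Nat.pos_of_ne_zero hd); omega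
        · have he : j - i0 = (j - (i0 + 1)) + 1 := by omega
          rw [he]; simpa using hjc hge
      · intro hlt
        obtain ⟨_, hj0⟩ := hjlt (by omega)
        by_cases hd : d = 0
        · rw [if_pos hd] at hj0; omega
        · rw [if_neg hd] at hj0
          exact ⟨Nat.pos_of_ne_zero hd, hj0⟩
    · rw [if_neg h1] at hji
      by_cases h2 : ch = ')' ∧ 0 < d
      · rw [if_pos h2] at hji
        obtain ⟨hch, hd⟩ := h2
        subst hch
        by_cases hd1 : d = 1
        · rw [if_pos hd1] at hji
          simp only [Option.some.injEq, Prod.mk.injEq] at hji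
          obtain ⟨rfl, rfl⟩ := hji
          have := hj hd
          exact ⟨le_refl _, by simp, by simp, this, fun hij => by omega, fun _ => ⟨hd, rfl⟩⟩
        · rw [if_neg hd1] at hji
          obtain ⟨hi1, hi2, hi3, hji', hjc, hjlt⟩ := ih (i0 + 1) (d - 1) j0
            (fun _ => Nat.lt_succ_of_lt (hj hd)) j i hji
          refine ⟨by omega, by simp only [List.length_cons]; omega, ?_, hji', ?_, ?_⟩
          · have he : i - i0 = (i - (i0 + 1)) + 1 := by omega
            rw [he]; simpa using hi3
          · intro hij
            rcases Nat.lt_or_ge j (i0 + 1) with hlt | hge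
            · obtain ⟨_, rfl⟩ := hjlt hlt
              have := hj hd; omega
            · have he : j - i0 = (j - (i0 + 1)) + 1 := by omega
              rw [he]; simpa using hjc hge
          · intro hlt
            obtain ⟨_, rfl⟩ := hjlt (by omega)
            exact ⟨hd, rfl⟩
      · rw [if_neg h2] at hji
        obtain ⟨hi1, hi2, hi3, hji', hjc, hjlt⟩ := ih (i0 + 1) d j0
          (fun hpos => Nat.lt_succ_of_lt (hj hpos)) j i hji
        refine ⟨by omega, by simp only [List.length_cons]; omega, ?_, hji', ?_, ?_⟩
        · have he : i - i0 = (i - (i0 + 1)) + 1 := by omega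
          rw [he]; simpa using hi3
        · intro hij
          rcases Nat.lt_or_ge j (i0 + 1) with hlt | hge
          · obtain ⟨hdp, rfl⟩ := hjlt hlt
            have := hj hdp; omega
          · have he : j - i0 = (j - (i0 + 1)) + 1 := by omega
            rw [he]; simpa using hjc hge
        · intro hlt
          obtain ⟨hdp, rfl⟩ := hjlt (by omega)
          exact ⟨hdp, rfl⟩

-- B's pairs(): the table of removable pairs, most significant first
def pairsB (s : List Char) (off : Nat) : List (Nat × Nat) :=
  match h : matchB s 0 0 0 with
  | none => []
  | some (j, i) =>
    pairsB ((s.drop (j + 1)).take (i - (j + 1))) (off + j + 1) ++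
      pairsB (s.drop (i + 1)) (off + i + 1) ++ [(off + j, off + i)]
termination_by s.length
decreasing_by
  · have := matchB_char s 0 0 0 (by omega) j i h
    simp only [List.length_take, List.length_drop]; omega
  · have := matchB_char s 0 0 0 (by omega) j i h
    simp only [List.length_drop]; omega

-- B's inner `for b, (o, c) in enumerate(sig)` loop building the skip set
def skipB (sig : List (Nat × Nat)) (k mask : Nat) : PySem.Set Nat :=
  (sig.zipIdx).foldl (fun sk pb =>
      if (mask >>> (k - 1 - pb.2)) &&& 1 = 1 then
        PySem.Set.add (PySem.Set.add sk pb.1.1) pb.1.2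
      else sk) []

-- "".join(ch for t, ch in enumerate(string) if t not in skip)
def buildB (s : List Char) (sk : PySem.Set Nat) : List Char :=
  ((s.zipIdx).filter (fun tc => !(PySem.Set.contains sk tc.2))).map (fun tc => tc.1)

-- B's main loop: `for mask in range(1 << k): out.add(...)`
def solveB (s : List Char) : List (List Char) :=
  let sig := pairsB s 0
  let k := sig.length
  (List.range (1 <<< k)).foldl
    (fun out mask => PySem.Set.add out (buildB s (skipB sig k mask))) []

def solve_alt (string : String) : List String := (solveB string.toList).map String.ofList

-- ===== PRECONDITION & SPEC =====
def Spec_solve (string : String) (out : List String) : Prop := out = solve_alt string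
instance (string : String) (out : List String) : Decidable (Spec_solve string out) := by unfold Spec_solve; infer_instance

-- ===== CLAIM (what is proved, stated in full; the proofs are below) =====
def Claim_equal_solve : Prop := ∀ (string : String), Dom_solve string → Spec_solve string (solve string)

-- ===== LEMMAS AND PROOFS =====

theorem loopA_eq_matchB (cs : List Char) : ∀ (i : Nat) (st : List Nat) (j0 : Nat),
    (st ≠ [] → st.getLast? = some j0) → loopA cs i st = matchB cs i st.length j0 := by
  induction cs with
  | nil => intro i st j0 _; simp [loopA, matchB]
  | cons e rest ih =>
    intro i st j0 hl
    simp only [loopA, matchB]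
    by_cases h1 : e = '('
    · rw [if_pos h1, if_pos h1]
      have hnext : (i :: st) ≠ [] → (i :: st).getLast? = some (if st.length = 0 then i else j0) := by
        intro _
        cases st with
        | nil => simp
        | cons a t =>
          rw [List.getLast?_cons_cons]
          simp only [List.length_cons]
          rw [if_neg (by omega)]
          exact hl (by simp)
      have := ih (i + 1) (i :: st) _ hnext
      simpa [List.length_cons] using this
    · rw [if_neg h1, if_neg h1]
      cases st with
      | nil =>
        rw [if_neg (by simp), if_neg (by simp), if_neg (by simp)]
        exact ih (i + 1) [] j0 (fun h => absurd rfl h)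
      | cons a t =>
        by_cases h2 : e = ')'
        · cases t with
          | nil =>
            have hx : ([a] : List Nat).getLast? = some j0 := hl (by simp)
            simp only [List.getLast?_singleton, Option.some.injEq] at hx
            subst hx
            simp [h2]
          | cons b t' =>
            rw [if_pos (by refine ⟨h2, ?_⟩; simp only [List.length_cons]; omega), if_pos (by refine ⟨h2, ?_⟩; simp only [List.length_cons]; omega)]
            rw [if_neg (by simp)]
            have := ih (i + 1) (b :: t') j0 (fun _ => by
              rw [← List.getLast?_cons_cons (a := a)]; exact hl (by simp))
            simpa [List.length_cons] using this
        · rw [if_neg (by simp [h2]), if_neg (by simp [h2]), if_neg (by simp [h2])]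
          have := ih (i + 1) (a :: t) j0 hl
          simpa using this

-- equation lemmas for pairsB
theorem pairsB_none {s : List Char} {off : Nat} (h : matchB s 0 0 0 = none) :
    pairsB s off = [] := by
  rw [pairsB]
  split
  · rfl
  · next j' i' heq => rw [h] at heq; cases heq

theorem pairsB_some {s : List Char} {off j i : Nat} (h : matchB s 0 0 0 = some (j, i)) :
    pairsB s off =
      pairsB ((s.drop (j + 1)).take (i - (j + 1))) (off + j + 1) ++
        pairsB (s.drop (i + 1)) (off + i + 1) ++ [(off + j, off + i)] := by
  rw [pairsB]
  split
  · next heq => rw [h] at heq; cases heq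
  · next j' i' heq =>
    rw [h] at heq
    simp only [Option.some.injEq, Prod.mk.injEq] at heq
    obtain ⟨rfl, rfl⟩ := heq
    simp

-- pairsB only shifts all coordinates by its offset argument
theorem pairsB_shift_aux (n : Nat) : ∀ (s : List Char), s.length ≤ n → ∀ off,
    pairsB s off = (pairsB s 0).map (fun p => (p.1 + off, p.2 + off)) := by
  induction n with
  | zero =>
    intro s hs off
    have hnil : s = [] := List.eq_nil_of_length_eq_zero (by omega)
    subst hnil
    have h : matchB [] 0 0 0 = none := rfl
    rw [pairsB_none h, pairsB_none h]; simp
  | succ n ih =>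
    intro s hs off
    cases h : matchB s 0 0 0 with
    | none => rw [pairsB_none h, pairsB_none h]; simp
    | some ji =>
      obtain ⟨j, i⟩ := ji
      obtain ⟨-, hilen, -, hji, -, -⟩ := matchB_char s 0 0 0 (by omega) j i h
      simp only [Nat.sub_zero] at hilen
      rw [pairsB_some h, pairsB_some h]
      have hM : ((s.drop (j + 1)).take (i - (j + 1))).length ≤ n := by
        simp only [List.length_take, List.length_drop]; omega
      have hB : (s.drop (i + 1)).length ≤ n := by
        simp only [List.length_drop]; omega
      rw [ih _ hM (off + j + 1), ih _ hM (0 + j + 1), ih _ hB (off + i + 1), ih _ hB (0 + i + 1)]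
      simp only [List.map_append, List.map_map, List.map_cons, List.map_nil]
      congr 2
      · apply List.map_congr_left; intro p _; simp [Function.comp]; omega
      · apply List.map_congr_left; intro p _; simp [Function.comp]; omega
      · simp; omega

theorem pairsB_shift (s : List Char) (off : Nat) :
    pairsB s off = (pairsB s 0).map (fun p => (p.1 + off, p.2 + off)) :=
  pairsB_shift_aux s.length s le_rfl off

-- every recorded pair is ordered and in range
theorem pairsB_bounds_aux (n : Nat) : ∀ (s : List Char), s.length ≤ n →
    ∀ p ∈ pairsB s 0, p.1 < p.2 ∧ p.2 < s.length := by
  induction n with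
  | zero =>
    intro s hs p hp
    have hnil : s = [] := List.eq_nil_of_length_eq_zero (by omega)
    subst hnil
    rw [pairsB_none rfl] at hp
    simp at hp
  | succ n ih =>
    intro s hs p hp
    cases h : matchB s 0 0 0 with
    | none => rw [pairsB_none h] at hp; simp at hp
    | some ji =>
      obtain ⟨j, i⟩ := ji
      obtain ⟨-, hilen, -, hji, -, -⟩ := matchB_char s 0 0 0 (by omega) j i h
      simp only [Nat.sub_zero] at hilen
      rw [pairsB_some h] at hp
      have hMlen : ((s.drop (j + 1)).take (i - (j + 1))).length = i - (j + 1) := by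
        simp only [List.length_take, List.length_drop]; omega
      rcases List.mem_append.1 hp with hp' | hlast
      · rcases List.mem_append.1 hp' with hm | hb
        · rw [pairsB_shift _ (0 + j + 1)] at hm
          obtain ⟨q, hq, rfl⟩ := List.mem_map.1 hm
          obtain ⟨hq1, hq2⟩ := ih _ (by omega) q hq
          rw [hMlen] at hq2
          constructor <;> omega
        · rw [pairsB_shift _ (0 + i + 1)] at hb
          obtain ⟨q, hq, rfl⟩ := List.mem_map.1 hb
          obtain ⟨hq1, hq2⟩ := ih _ (by simp only [List.length_drop]; omega) q hq
          simp only [List.length_drop] at hq2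
          constructor <;> omega
      · simp only [List.mem_singleton] at hlast
        subst hlast
        simp only [Nat.zero_add]
        exact ⟨hji, hilen⟩

theorem pairsB_bounds (s : List Char) : ∀ p ∈ pairsB s 0, p.1 < p.2 ∧ p.2 < s.length :=
  pairsB_bounds_aux s.length s le_rfl

-- splitting a string at two known bracket positions
theorem list_surgery (s : List Char) (j i : Nat) (hji : j < i) (hi : i < s.length)
    (hj : s[j]? = some '(') (hic : s[i]? = some ')') :
    s = s.take j ++ '(' :: ((s.drop (j + 1)).take (i - (j + 1)) ++ ')' :: s.drop (i + 1)) := by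
  have hj' : j < s.length := by omega
  have e1 : s[j] = '(' := by
    rw [List.getElem?_eq_getElem hj'] at hj; exact Option.some.inj hj
  have e2 : s[i] = ')' := by
    rw [List.getElem?_eq_getElem hi] at hic; exact Option.some.inj hic
  conv_lhs => rw [← List.take_append_drop j s, List.drop_eq_getElem_cons hj', e1,
    ← List.take_append_drop (i - (j + 1)) (s.drop (j + 1))]
  rw [List.drop_drop]
  have h3 : j + 1 + (i - (j + 1)) = i := by omega
  rw [h3, List.drop_eq_getElem_cons hi, e2]

theorem mem_skipB_aux (l : List ((Nat × Nat) × Nat)) : ∀ (acc : PySem.Set Nat) (k mask t : Nat),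
    (t ∈ l.foldl (fun sk pb =>
        if (mask >>> (k - 1 - pb.2)) &&& 1 = 1 then
          PySem.Set.add (PySem.Set.add sk pb.1.1) pb.1.2
        else sk) acc)
      ↔ t ∈ acc ∨ ∃ pb ∈ l, (mask >>> (k - 1 - pb.2)) &&& 1 = 1 ∧ (t = pb.1.1 ∨ t = pb.1.2) := by
  induction l with
  | nil => intro acc k mask t; simp
  | cons pb rest ih =>
    intro acc k mask t
    simp only [List.foldl_cons]
    rw [ih]
    by_cases hb : (mask >>> (k - 1 - pb.2)) &&& 1 = 1
    · rw [if_pos hb]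
      simp only [PySem.Set.mem_add, List.mem_cons]
      constructor
      · rintro (((h | h) | h) | ⟨q, hq, hbit, hco⟩)
        · exact Or.inl h
        · exact Or.inr ⟨pb, Or.inl rfl, hb, Or.inl h⟩
        · exact Or.inr ⟨pb, Or.inl rfl, hb, Or.inr h⟩
        · exact Or.inr ⟨q, Or.inr hq, hbit, hco⟩
      · rintro (h | ⟨q, (rfl | hq), hbit, hco⟩)
        · exact Or.inl (Or.inl (Or.inl h))
        · rcases hco with h | h
          · exact Or.inl (Or.inl (Or.inr h))
          · exact Or.inl (Or.inr h)
        · exact Or.inr ⟨q, hq, hbit, hco⟩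
    · rw [if_neg hb]
      constructor
      · rintro (h | ⟨q, hq, hbit, hco⟩)
        · exact Or.inl h
        · exact Or.inr ⟨q, List.mem_cons_of_mem _ hq, hbit, hco⟩
      · rintro (h | ⟨q, hq, hbit, hco⟩)
        · exact Or.inl h
        · rcases List.mem_cons.1 hq with rfl | hq'
          · exact absurd hbit hb
          · exact Or.inr ⟨q, hq', hbit, hco⟩

theorem mem_skipB (sig : List (Nat × Nat)) (k mask t : Nat) :
    t ∈ skipB sig k mask ↔
      ∃ pb ∈ sig.zipIdx, (mask >>> (k - 1 - pb.2)) &&& 1 = 1 ∧ (t = pb.1.1 ∨ t = pb.1.2) := by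
  unfold skipB
  rw [mem_skipB_aux]
  simp

theorem bit_high (a r x c : Nat) (hr : r < 2 ^ c) :
    ((a * 2 ^ c + r) >>> (x + c)) &&& 1 = (a >>> x) &&& 1 := by
  simp only [Nat.shiftRight_eq_div_pow]
  have h1 : (2:Nat) ^ (x + c) = 2 ^ c * 2 ^ x := by rw [pow_add, mul_comm]
  rw [h1, ← Nat.div_div_eq_div_mul]
  congr 2
  rw [mul_comm, Nat.mul_add_div (Nat.pow_pos (by norm_num))]
  simp [Nat.div_eq_of_lt hr]
theorem bit_low (a b x c : Nat) (hx : x < c) :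
    ((a * 2 ^ c + b) >>> x) &&& 1 = (b >>> x) &&& 1 := by
  simp only [Nat.shiftRight_eq_div_pow, Nat.and_one_is_mod]
  have h1 : a * 2 ^ c = (a * 2 ^ (c - x - 1) * 2) * 2 ^ x := by
    have h2 : (2:Nat) ^ c = 2 ^ (c - x - 1) * 2 * 2 ^ x := by
      rw [mul_assoc, mul_comm 2 (2 ^ x), ← mul_assoc, ← pow_add, ← pow_succ]
      congr 1
      omega
    rw [h2, ← mul_assoc, ← mul_assoc]
  rw [h1, Nat.add_comm, Nat.add_mul_div_right _ _ (Nat.pow_pos (by norm_num))]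
  omega

theorem buildB_split (F M B : List Char) (SM SB : List (Nat × Nat)) (μm μb t : Nat)
    (hSM : ∀ p ∈ SM, p.1 < p.2 ∧ p.2 < M.length)
    (hSB : ∀ p ∈ SB, p.1 < p.2 ∧ p.2 < B.length)
    (hμb : μb < 2 ^ SB.length) (ht : t < 2) :
    buildB (F ++ '(' :: (M ++ ')' :: B))
        (skipB (SM.map (fun p => (p.1 + (F.length + 1), p.2 + (F.length + 1))) ++
                  SB.map (fun p => (p.1 + (F.length + 1 + M.length + 1),
                                    p.2 + (F.length + 1 + M.length + 1))) ++
                  [(F.length, F.length + 1 + M.length)])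
          (SM.length + SB.length + 1)
          (μm * 2 ^ (SB.length + 1) + (μb * 2 + t)))
      = if t = 1
          then F ++ (buildB M (skipB SM SM.length μm) ++ buildB B (skipB SB SB.length μb))
          else F ++ '(' :: (buildB M (skipB SM SM.length μm) ++ ')' :: buildB B (skipB SB SB.length μb)) := by
  set j := F.length with hj
  set i := F.length + 1 + M.length with hi
  set km := SM.length with hkm
  set kb := SB.length with hkb
  set k := km + kb + 1 with hk
  set mask := μm * 2 ^ (kb + 1) + (μb * 2 + t) with hmask
  set sig := SM.map (fun p => (p.1 + (j + 1), p.2 + (j + 1))) ++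
      SB.map (fun p => (p.1 + (i + 1), p.2 + (i + 1))) ++ [(j, i)] with hsig
  set sk := skipB sig k mask with hsk
  -- bit computations
  have hpow : (2:Nat) ^ (kb + 1) = 2 ^ kb * 2 := by rw [pow_succ]
  have hbit_last : (mask >>> (k - 1 - (km + kb))) &&& 1 = t := by
    have h0 : k - 1 - (km + kb) = 0 := by omega
    rw [h0, hmask]
    have h1 := bit_low μm (μb * 2 + t) 0 (kb + 1) (by omega)
    have h2 := bit_low μb t 0 1 (by omega)
    simp only [Nat.shiftRight_zero, pow_one] at h1 h2 ⊢
    rw [h1, h2]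
    interval_cases t <;> rfl
  have hbm : ∀ L, L < km → (mask >>> (k - 1 - L)) &&& 1 = (μm >>> (km - 1 - L)) &&& 1 := by
    intro L hL
    have he : k - 1 - L = (km - 1 - L) + (kb + 1) := by omega
    rw [he, hmask]
    exact bit_high μm (μb * 2 + t) (km - 1 - L) (kb + 1) (by omega)
  have hbb : ∀ L, L < kb → (mask >>> (k - 1 - (km + L))) &&& 1 = (μb >>> (kb - 1 - L)) &&& 1 := by
    intro L hL
    have he : k - 1 - (km + L) = ((kb - 1 - L) + 1) := by omega
    rw [he, hmask]
    have h1 := bit_low μm (μb * 2 + t) ((kb - 1 - L) + 1) (kb + 1) (by omega)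
    rw [h1]
    have h2 := bit_high μb t (kb - 1 - L) 1 (by omega)
    rw [pow_one] at h2
    exact h2
  -- decomposition of sig.zipIdx
  have hzip : sig.zipIdx = (SM.zipIdx).map (fun qL => ((qL.1.1 + (j + 1), qL.1.2 + (j + 1)), qL.2)) ++
      ((SB.zipIdx).map (fun qL => ((qL.1.1 + (i + 1), qL.1.2 + (i + 1)), km + qL.2)) ++
      [((j, i), km + kb)]) := by
    rw [hsig]
    rw [List.zipIdx_append, List.zipIdx_append]
    rw [List.zipIdx_map, List.zipIdx_map]
    rw [List.zipIdx_eq_map_add (i := 0 + (SM.map (fun p => (p.1 + (j + 1), p.2 + (j + 1)))).length)]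
    simp only [List.length_map, List.length_append, List.zipIdx_cons, List.zipIdx_nil,
      List.map_map, Nat.zero_add, List.append_assoc]
    rfl
  -- membership characterization of the skip set
  have hmem : ∀ x : Nat, x ∈ sk ↔
      ((∃ qL ∈ SM.zipIdx, (mask >>> (k - 1 - qL.2)) &&& 1 = 1 ∧
          (x = qL.1.1 + (j + 1) ∨ x = qL.1.2 + (j + 1))) ∨
       (∃ qL ∈ SB.zipIdx, (mask >>> (k - 1 - (km + qL.2))) &&& 1 = 1 ∧
          (x = qL.1.1 + (i + 1) ∨ x = qL.1.2 + (i + 1))) ∨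
       (t = 1 ∧ (x = j ∨ x = i))) := by
    intro x
    rw [hsk, mem_skipB, hzip]
    constructor
    · rintro ⟨pb, hpb, hbit, hco⟩
      rcases List.mem_append.1 hpb with h1 | h1
      · obtain ⟨qL, hqL, rfl⟩ := List.mem_map.1 h1
        exact Or.inl ⟨qL, hqL, hbit, hco⟩
      rcases List.mem_append.1 h1 with h2 | h2
      · obtain ⟨qL, hqL, rfl⟩ := List.mem_map.1 h2
        exact Or.inr (Or.inl ⟨qL, hqL, hbit, hco⟩)
      · simp only [List.mem_singleton] at h2
        subst h2
        rw [hbit_last] at hbit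
        exact Or.inr (Or.inr ⟨hbit, hco⟩)
    · rintro (⟨qL, hqL, hbit, hco⟩ | ⟨qL, hqL, hbit, hco⟩ | ⟨ht1, hco⟩)
      · exact ⟨_, List.mem_append.2 (Or.inl (List.mem_map_of_mem hqL)), hbit, hco⟩
      · exact ⟨_, List.mem_append.2 (Or.inr (List.mem_append.2
          (Or.inl (List.mem_map_of_mem hqL)))), hbit, hco⟩
      · exact ⟨((j, i), km + kb), List.mem_append.2 (Or.inr (List.mem_append.2
          (Or.inr (List.mem_singleton.2 rfl)))), by rw [hbit_last]; exact ht1, hco⟩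
  -- the five position facts
  have hfe : ∀ r, r < j → r ∉ sk := by
    intro r hr hmem'
    rcases (hmem r).1 hmem' with ⟨⟨q, L⟩, hqL, _, hco⟩ | ⟨⟨q, L⟩, hqL, _, hco⟩ | ⟨_, hco⟩
    · (try dsimp only at hco); rcases hco with h | h <;> omega
    · (try dsimp only at hco); rcases hco with h | h <;> omega
    · (try dsimp only at hco); rcases hco with h | h <;> omega
  have hje : j ∈ sk ↔ t = 1 := by
    rw [hmem]
    constructor
    · rintro (⟨⟨q, L⟩, hqL, _, hco⟩ | ⟨⟨q, L⟩, hqL, _, hco⟩ | ⟨ht1, _⟩)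
      · (try dsimp only at hco); rcases hco with h | h <;> omega
      · (try dsimp only at hco); rcases hco with h | h <;> omega
      · exact ht1
    · intro ht1
      exact Or.inr (Or.inr ⟨ht1, Or.inl rfl⟩)
  have hie : i ∈ sk ↔ t = 1 := by
    rw [hmem]
    constructor
    · rintro (⟨⟨q, L⟩, hqL, _, hco⟩ | ⟨⟨q, L⟩, hqL, _, hco⟩ | ⟨ht1, _⟩)
      · obtain ⟨-, -, hq⟩ := List.mem_zipIdx hqL
        have hqm : q ∈ SM := by rw [hq]; exact List.getElem_mem _
        obtain ⟨hq1, hq2⟩ := hSM q hqm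
        (try dsimp only at hco); rcases hco with h | h <;> omega
      · (try dsimp only at hco); rcases hco with h | h <;> omega
      · exact ht1
    · intro ht1
      exact Or.inr (Or.inr ⟨ht1, Or.inr rfl⟩)
  have hme : ∀ r, r < M.length → ((j + 1 + r) ∈ sk ↔ r ∈ skipB SM km μm) := by
    intro r hr
    rw [hmem, mem_skipB]
    constructor
    · rintro (⟨⟨q, L⟩, hqL, hbit, hco⟩ | ⟨⟨q, L⟩, hqL, hbit, hco⟩ | ⟨_, hco⟩)
      · obtain ⟨-, hL, -⟩ := List.mem_zipIdx hqL
        simp only [Nat.zero_add] at hL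
        rw [hbm L (by omega)] at hbit
        exact ⟨(q, L), hqL, hbit, by (try dsimp only at hco ⊢); rcases hco with h | h <;> [left; right] <;> omega⟩
      · (try dsimp only at hco); rcases hco with h | h <;> omega
      · (try dsimp only at hco); rcases hco with h | h <;> omega
    · rintro ⟨⟨q, L⟩, hqL, hbit, hco⟩
      obtain ⟨-, hL, -⟩ := List.mem_zipIdx hqL
      simp only [Nat.zero_add] at hL
      refine Or.inl ⟨(q, L), hqL, by rw [hbm L (by omega)]; exact hbit, ?_⟩
      (try dsimp only at hco ⊢); rcases hco with h | h <;> [left; right] <;> omega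
  have hbe : ∀ r, ((i + 1 + r) ∈ sk ↔ r ∈ skipB SB kb μb) := by
    intro r
    rw [hmem, mem_skipB]
    constructor
    · rintro (⟨⟨q, L⟩, hqL, hbit, hco⟩ | ⟨⟨q, L⟩, hqL, hbit, hco⟩ | ⟨_, hco⟩)
      · obtain ⟨-, -, hq⟩ := List.mem_zipIdx hqL
        have hqm : q ∈ SM := by rw [hq]; exact List.getElem_mem _
        obtain ⟨hq1, hq2⟩ := hSM q hqm
        (try dsimp only at hco); rcases hco with h | h <;> omega
      · obtain ⟨-, hL, -⟩ := List.mem_zipIdx hqL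
        simp only [Nat.zero_add] at hL
        rw [hbb L (by omega)] at hbit
        exact ⟨(q, L), hqL, hbit, by (try dsimp only at hco ⊢); rcases hco with h | h <;> [left; right] <;> omega⟩
      · (try dsimp only at hco); rcases hco with h | h <;> omega
    · rintro ⟨⟨q, L⟩, hqL, hbit, hco⟩
      obtain ⟨-, hL, -⟩ := List.mem_zipIdx hqL
      simp only [Nat.zero_add] at hL
      refine Or.inr (Or.inl ⟨(q, L), hqL, by rw [hbb L (by omega)]; exact hbit, ?_⟩)
      (try dsimp only at hco ⊢); rcases hco with h | h <;> [left; right] <;> omega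
  -- Boolean transport for the filter predicate
  have hcf : ∀ (S : PySem.Set Nat) (x : Nat), x ∉ S → PySem.Set.contains S x = false := by
    intro S x hx
    cases hb : PySem.Set.contains S x
    · rfl
    · exact absurd ((PySem.Set.contains_iff S x).1 hb) hx
  have hbool : ∀ (S T : PySem.Set Nat) (x y : Nat), (x ∈ S ↔ y ∈ T) →
      (!(PySem.Set.contains S x)) = (!(PySem.Set.contains T y)) := by
    intro S T x y hiff
    by_cases h : y ∈ T
    · rw [(PySem.Set.contains_iff S x).2 (hiff.2 h), (PySem.Set.contains_iff T y).2 h]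
    · rw [hcf S x (fun hx => h (hiff.1 hx)), hcf T y h]
  have hfalse : ∀ x : Nat, x ∉ sk → (!(PySem.Set.contains sk x)) = true := by
    intro x hx
    rw [hcf sk x hx]
    rfl
  have htrue : ∀ x : Nat, x ∈ sk → (!(PySem.Set.contains sk x)) = false := by
    intro x hx
    rw [(PySem.Set.contains_iff sk x).2 hx]
    rfl
  -- decompose the zipIdx of the assembled string
  have hS : (F ++ '(' :: (M ++ ')' :: B)).zipIdx =
      F.zipIdx ++ (('(', j) :: (M.zipIdx (j + 1) ++ ((')', i) :: B.zipIdx (i + 1)))) := by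
    rw [List.zipIdx_append, List.zipIdx_cons, List.zipIdx_append, List.zipIdx_cons]
    simp only [Nat.zero_add]
    rfl
  -- the three list chunks
  have c1 : (F.zipIdx.filter (fun tc => !(PySem.Set.contains sk tc.2))) = F.zipIdx := by
    apply List.filter_eq_self.2
    intro tc htc
    obtain ⟨-, hlt, -⟩ := List.mem_zipIdx htc
    exact hfalse tc.2 (hfe tc.2 (by omega))
  have c2 : ((M.zipIdx (j + 1)).filter (fun tc => !(PySem.Set.contains sk tc.2))).map
        (fun tc => tc.1) = buildB M (skipB SM km μm) := by
    rw [List.zipIdx_eq_map_add, List.filter_map, List.map_map]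
    rw [List.filter_congr (q := fun tc => !(PySem.Set.contains (skipB SM km μm) tc.2)) ?_]
    · rfl
    · intro qr hqr
      obtain ⟨-, hlt, -⟩ := List.mem_zipIdx hqr
      simp only [Nat.zero_add] at hlt
      exact hbool _ _ _ _ (by
        have := hme qr.2 (by omega)
        simpa [Nat.add_comm, Nat.add_assoc, Nat.add_left_comm] using this)
  have c3 : ((B.zipIdx (i + 1)).filter (fun tc => !(PySem.Set.contains sk tc.2))).map
        (fun tc => tc.1) = buildB B (skipB SB kb μb) := by
    rw [List.zipIdx_eq_map_add, List.filter_map, List.map_map]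
    rw [List.filter_congr (q := fun tc => !(PySem.Set.contains (skipB SB kb μb) tc.2)) ?_]
    · rfl
    · intro qr hqr
      exact hbool _ _ _ _ (by
        have := hbe qr.2
        simpa [Nat.add_comm, Nat.add_assoc, Nat.add_left_comm] using this)
  have c0 : (F.zipIdx.map (fun tc => tc.1)) = F := by
    simpa using List.zipIdx_map_fst 0 F
  -- assemble, by the value of t
  rcases (by omega : t = 0 ∨ t = 1) with rfl | rfl
  · have hj0 : j ∉ sk := fun h => by have := hje.1 h; omega
    have hi0 : i ∉ sk := fun h => by have := hie.1 h; omega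
    rw [if_neg (by omega : ¬(0 = 1))]
    unfold buildB
    rw [hS, List.filter_append,
      List.filter_cons_of_pos (p := fun tc => !(PySem.Set.contains sk tc.2))
        (a := ('(', j)) (hfalse j hj0),
      List.filter_append,
      List.filter_cons_of_pos (p := fun tc => !(PySem.Set.contains sk tc.2))
        (a := (')', i)) (hfalse i hi0)]
    simp only [List.map_append, List.map_cons]
    rw [c1, c0, c2, c3]
    rfl
  · have hj1 : j ∈ sk := hje.2 rfl
    have hi1 : i ∈ sk := hie.2 rfl
    rw [if_pos rfl]
    unfold buildB
    rw [hS, List.filter_append,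
      List.filter_cons_of_neg (p := fun tc => !(PySem.Set.contains sk tc.2))
        (a := ('(', j)) (by show ¬(!(PySem.Set.contains sk j)) = true; rw [htrue j hj1]; simp),
      List.filter_append,
      List.filter_cons_of_neg (p := fun tc => !(PySem.Set.contains sk tc.2))
        (a := (')', i)) (by show ¬(!(PySem.Set.contains sk i)) = true; rw [htrue i hi1]; simp)]
    simp only [List.map_append]
    rw [c1, c0, c2, c3]
    rfl

-- ordered first-occurrence dedup relative to a seen-set (proof-only helper)
def dedupSeen {α : Type} [BEq α] (seen : PySem.Set α) : List α → List α
  | [] => []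
  | x :: r =>
    if PySem.Set.contains seen x then dedupSeen seen r
    else x :: dedupSeen (PySem.Set.add seen x) r

theorem foldl_add_eq_dedupSeen {α : Type} [BEq α] [LawfulBEq α] :
    ∀ (xs : List α) (seen : PySem.Set α),
      xs.foldl PySem.Set.add seen = seen ++ dedupSeen seen xs := by
  intro xs
  induction xs with
  | nil => intro seen; simp [dedupSeen]
  | cons x r ih =>
    intro seen
    simp only [List.foldl_cons, dedupSeen]
    by_cases hx : x ∈ seen
    · rw [if_pos ((PySem.Set.contains_iff seen x).2 hx), PySem.Set.add_of_mem hx, ih]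
    · rw [if_neg (fun hc => hx ((PySem.Set.contains_iff seen x).1 hc)),
        PySem.Set.add_of_not_mem hx, ih, List.append_assoc]
      rfl

theorem foldl_add_of_subset {β : Type} [BEq β] [LawfulBEq β] :
    ∀ (ys : List β) (S : PySem.Set β), (∀ v ∈ ys, v ∈ S) → ys.foldl PySem.Set.add S = S := by
  intro ys
  induction ys with
  | nil => intro S _; rfl
  | cons y r ih =>
    intro S h
    simp only [List.foldl_cons]
    rw [PySem.Set.add_of_mem (h y (by simp))]
    exact ih S (fun v hv => h v (by simp [hv]))

theorem mem_foldl_add_mono {β : Type} [BEq β] [LawfulBEq β] :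
    ∀ (ys : List β) (S : PySem.Set β) (v : β), v ∈ S → v ∈ ys.foldl PySem.Set.add S := by
  intro ys
  induction ys with
  | nil => intro S v hv; exact hv
  | cons y r ih =>
    intro S v hv
    exact ih _ v ((PySem.Set.mem_add S y v).2 (Or.inl hv))

theorem mem_foldl_add_self {β : Type} [BEq β] [LawfulBEq β] :
    ∀ (ys : List β) (S : PySem.Set β) (v : β), v ∈ ys → v ∈ ys.foldl PySem.Set.add S := by
  intro ys
  induction ys with
  | nil => intro S v hv; simp at hv
  | cons y r ih =>
    intro S v hv
    rcases List.mem_cons.1 hv with rfl | hv'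
    · exact mem_foldl_add_mono r _ v ((PySem.Set.mem_add S v v).2 (Or.inr rfl))
    · exact ih _ v hv'

theorem blocks_dedupSeen {α β : Type} [BEq α] [LawfulBEq α] [BEq β] [LawfulBEq β]
    (f : α → List β) : ∀ (xs : List α) (S : PySem.Set β) (seen : PySem.Set α),
      (∀ x, x ∈ seen → ∀ v ∈ f x, v ∈ S) →
      xs.foldl (fun acc y => (f y).foldl PySem.Set.add acc) S =
        (dedupSeen seen xs).foldl (fun acc y => (f y).foldl PySem.Set.add acc) S := by
  intro xs
  induction xs with
  | nil => intro S seen _; rfl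
  | cons x r ih =>
    intro S seen h
    simp only [List.foldl_cons, dedupSeen]
    by_cases hx : x ∈ seen
    · rw [if_pos ((PySem.Set.contains_iff seen x).2 hx), foldl_add_of_subset _ _ (h x hx)]
      exact ih S seen h
    · rw [if_neg (fun hc => hx ((PySem.Set.contains_iff seen x).1 hc))]
      simp only [List.foldl_cons]
      apply ih
      intro x' hx' v hv
      rcases (PySem.Set.mem_add seen x x').1 hx' with h' | rfl
      · exact mem_foldl_add_mono _ _ v (h x' h' v hv)
      · exact mem_foldl_add_self _ _ v hv

theorem foldl_add_flatMap_dedup {α β : Type} [BEq α] [LawfulBEq α] [BEq β] [LawfulBEq β]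
    (f : α → List β) (xs : List α) (S : PySem.Set β) :
    List.foldl PySem.Set.add S (xs.flatMap f) =
      List.foldl PySem.Set.add S ((PySem.Set.ofList xs).flatMap f) := by
  rw [List.foldl_flatMap, List.foldl_flatMap]
  have h1 : PySem.Set.ofList xs = dedupSeen [] xs := by
    have h2 := foldl_add_eq_dedupSeen xs []
    simpa [PySem.Set.ofList_eq_foldl] using h2
  rw [h1]
  exact blocks_dedupSeen f xs S [] (by simp)

theorem range_mul_flatMap (m n : Nat) :
    List.range (m * n) =
      (List.range m).flatMap (fun h => (List.range n).map (fun l => h * n + l)) := by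
  induction m with
  | zero => simp
  | succ m ih =>
    rw [Nat.succ_mul, List.range_add, List.range_succ, List.flatMap_append, ih]
    simp

theorem foldl_add_pair {α β : Type} [BEq β] (K Rm : α → β) (l : List α) (acc : PySem.Set β) :
    l.foldl (fun r b => PySem.Set.add (PySem.Set.add r (K b)) (Rm b)) acc =
      List.foldl PySem.Set.add acc (l.flatMap fun b => [K b, Rm b]) := by
  rw [List.foldl_flatMap]
  rfl

-- equation lemmas for solveA
theorem solveA_none {s : List Char} (h : loopA s 0 [] = none) : solveA s = [s] := by
  rw [solveA]
  split
  · rfl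
  · next j' i' heq => rw [h] at heq; cases heq

theorem solveA_some {s : List Char} {j i : Nat} (h : loopA s 0 [] = some (j, i)) :
    solveA s =
      (solveA ((s.drop (j + 1)).take (i - (j + 1)))).foldl (fun ret m =>
        (solveA (s.drop (i + 1))).foldl (fun ret b =>
          PySem.Set.add (PySem.Set.add ret (s.take j ++ '(' :: (m ++ ')' :: b)))
            (s.take j ++ (m ++ b))) ret) [] := by
  rw [solveA]
  split
  · next heq => rw [h] at heq; cases heq
  · next j' i' heq =>
    rw [h] at heq
    simp only [Option.some.injEq, Prod.mk.injEq] at heq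
    obtain ⟨rfl, rfl⟩ := heq
    rfl

-- solveB as a fold of Set.add over the list of all built strings
theorem solveB_eq (s : List Char) :
    solveB s = List.foldl PySem.Set.add []
      ((List.range (2 ^ (pairsB s 0).length)).map
        (fun mask => buildB s (skipB (pairsB s 0) (pairsB s 0).length mask))) := by
  simp only [solveB]
  rw [Nat.shiftLeft_eq, one_mul]
  conv_rhs => rw [List.foldl_map]

theorem buildB_empty (s : List Char) : buildB s ([] : PySem.Set Nat) = s := by
  unfold buildB
  rw [show (List.filter (fun tc => !(PySem.Set.contains ([] : PySem.Set Nat) tc.2)) s.zipIdx) = s.zipIdx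
    from List.filter_eq_self.2 (fun tc _ => rfl)]
  simpa using List.zipIdx_map_fst 0 s

theorem solveB_of_pairs_nil {s : List Char} (h : pairsB s 0 = []) : solveB s = [s] := by
  rw [solveB_eq, h]
  have hr : List.range (2 ^ ([] : List (Nat × Nat)).length) = [0] := rfl
  rw [hr]
  simp only [List.map_cons, List.map_nil]
  have hsk : skipB [] 0 0 = ([] : PySem.Set Nat) := rfl
  simp only [List.length_nil, hsk, buildB_empty]
  rw [List.foldl_cons, List.foldl_nil, PySem.Set.add_of_not_mem (List.not_mem_nil)]
  rfl

-- decomposing the mask range into (middle-bits, back-bits, pair-bit)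
theorem range_two_pow_decomp (a b : Nat) :
    List.range (2 ^ (a + b + 1)) =
      (List.range (2 ^ a)).flatMap (fun hi => (List.range (2 ^ b)).flatMap (fun mid =>
        [hi * 2 ^ (b + 1) + (mid * 2 + 0), hi * 2 ^ (b + 1) + (mid * 2 + 1)])) := by
  have h1 : (2:Nat) ^ (a + b + 1) = 2 ^ a * 2 ^ (b + 1) := by
    rw [← pow_add, Nat.add_assoc]
  have h2 : (2:Nat) ^ (b + 1) = 2 ^ b * 2 := pow_succ 2 b
  rw [h1, range_mul_flatMap]
  refine congrArg (fun g => List.flatMap g (List.range (2 ^ a))) (funext fun hi => ?_)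
  rw [h2, range_mul_flatMap, List.map_flatMap]
  refine congrArg (fun g => List.flatMap g (List.range (2 ^ b))) (funext fun mid => ?_)
  rfl

theorem solveA_eq_solveB_aux (n : Nat) : ∀ s : List Char, s.length ≤ n → solveA s = solveB s := by
  induction n with
  | zero =>
    intro s hs
    have hnil : s = [] := List.eq_nil_of_length_eq_zero (by omega)
    subst hnil
    rw [solveA_none rfl, solveB_of_pairs_nil (pairsB_none rfl)]
  | succ n ih =>
    intro s hs
    have htop : loopA s 0 [] = matchB s 0 0 0 :=
      loopA_eq_matchB s 0 [] 0 (fun h => absurd rfl h)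
    cases h : matchB s 0 0 0 with
    | none => rw [solveA_none (htop.trans h), solveB_of_pairs_nil (pairsB_none h)]
    | some ji =>
      obtain ⟨j, i⟩ := ji
      obtain ⟨-, hilen, hico, hji, hjco, -⟩ := matchB_char s 0 0 0 (by omega) j i h
      simp only [Nat.sub_zero] at hilen hico hjco
      have hjco' := hjco (Nat.zero_le j)
      have hpairs0 : pairsB s 0 =
          (pairsB ((s.drop (j + 1)).take (i - (j + 1))) 0).map
              (fun p => (p.1 + (j + 1), p.2 + (j + 1))) ++
            (pairsB (s.drop (i + 1)) 0).map (fun p => (p.1 + (i + 1), p.2 + (i + 1))) ++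
            [(j, i)] := by
        rw [pairsB_some h,
          pairsB_shift ((s.drop (j + 1)).take (i - (j + 1))) (0 + j + 1),
          pairsB_shift (s.drop (i + 1)) (0 + i + 1)]
        simp only [Nat.zero_add]
      rw [solveA_some (htop.trans h), solveB_eq, hpairs0]
      set F := s.take j with hF
      set M := (s.drop (j + 1)).take (i - (j + 1)) with hM
      set B := s.drop (i + 1) with hB
      set SM := pairsB M 0 with hSM0
      set SB := pairsB B 0 with hSB0
      have hFlen : F.length = j := by
        rw [hF, List.length_take]; omega
      have hMlen : M.length = i - (j + 1) := by
        rw [hM, List.length_take, List.length_drop]; omega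
      have hBlen : B.length = s.length - (i + 1) := by rw [hB, List.length_drop]
      have hsur : s = F ++ '(' :: (M ++ ')' :: B) :=
        list_surgery s j i hji hilen hjco' hico
      have hlen2 : (SM.map (fun p => (p.1 + (j + 1), p.2 + (j + 1))) ++
          SB.map (fun p => (p.1 + (i + 1), p.2 + (i + 1))) ++ [(j, i)]).length
          = SM.length + SB.length + 1 := by simp; omega
      rw [hlen2, hsur, ← hFlen]
      have hieq : i = F.length + 1 + M.length := by omega
      rw [hieq]
      -- the recursive results, as deduplicated generated lists
      have hMn : M.length ≤ n := by omega
      have hBn : B.length ≤ n := by omega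
      have hgm : solveA M = PySem.Set.ofList ((List.range (2 ^ SM.length)).map
          (fun μ => buildB M (skipB SM SM.length μ))) := by
        rw [ih M hMn, solveB_eq, ← hSM0, ← PySem.Set.ofList_eq_foldl]
      have hgb : solveA B = PySem.Set.ofList ((List.range (2 ^ SB.length)).map
          (fun μ => buildB B (skipB SB SB.length μ))) := by
        rw [ih B hBn, solveB_eq, ← hSB0, ← PySem.Set.ofList_eq_foldl]
      rw [hgm, hgb]
      simp only [foldl_add_pair]
      rw [← List.foldl_flatMap, ← foldl_add_flatMap_dedup]
      rw [List.foldl_flatMap]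
      rw [PySem.List.foldl_congr_mem' _ _
        (fun acc m => List.foldl PySem.Set.add acc
          ((List.map (fun μ => buildB B (skipB SB SB.length μ)) (List.range (2 ^ SB.length))).flatMap
            (fun b => [F ++ '(' :: (m ++ ')' :: b), F ++ (m ++ b)]))) _
        (fun m _ acc => (foldl_add_flatMap_dedup _ _ acc).symm)]
      rw [← List.foldl_flatMap]
      rw [range_two_pow_decomp, List.map_flatMap]
      simp only [List.map_flatMap, List.map_cons, List.map_nil]
      have hSMb : ∀ p ∈ SM, p.1 < p.2 ∧ p.2 < M.length := by
        rw [hSM0]; exact pairsB_bounds M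
      rw [List.flatMap_map]
      simp only [List.flatMap_map]
      rw [List.flatMap_def, List.flatMap_def]
      refine congrArg (List.foldl PySem.Set.add []) (congrArg List.flatten ?_)
      apply List.map_congr_left
      intro μm _
      rw [List.flatMap_def, List.flatMap_def]
      refine congrArg List.flatten ?_
      apply List.map_congr_left
      intro μb hμb
      have hμb' : μb < 2 ^ SB.length := List.mem_range.1 hμb
      have hs0 := buildB_split F M B SM SB μm μb 0 hSMb (by rw [hSB0]; exact pairsB_bounds B) hμb' (by omega)
      have hs1 := buildB_split F M B SM SB μm μb 1 hSMb (by rw [hSB0]; exact pairsB_bounds B) hμb' (by omega)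
      rw [if_neg (by omega)] at hs0
      rw [if_pos rfl] at hs1
      rw [hs0, hs1]

theorem solveA_eq_solveB : ∀ s : List Char, solveA s = solveB s := fun s =>
  solveA_eq_solveB_aux s.length s le_rfl

-- ===== VERDICT (by name: the statement is the Claim_ definition above) =====
theorem solve_spec : Claim_equal_solve := by
  intro string _
  unfold Spec_solve solve solve_alt
  rw [solveA_eq_solveB]
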